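-- pv_equiv track=rewrite | github.com/CapStoneProject-KW/Algorithm-Study | 230406/speardragon/bj_17829.py | solution
-- ===== SOURCE A (Python) =====
-- def solution(matrix):
--     if len(matrix) == 2:
--         tmp = matrix[0] + matrix[1]
--         return sorted(tmp, reverse=True)[1]
--
--     else:
--         while len(matrix) != 2:
--             m = len(matrix)
--             idx, jdx = 0, 0
--             slice = [[0]*(m//2) for _ in range(m//2)]
--
--             for i in range(0, m, 2):
--                 jdx = 0
--                 for j in range(0, m, 2):
--                     slice[idx][jdx] = solution([row[j:j+2] for row in matrix[i:i+2]])
--                     jdx+=1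
--                 idx+=1
--             matrix = slice[:]
--
--     return solution(matrix)
-- ===== SOURCE B (Python) =====
-- def _second4(a, b, c, d):
--     # second largest of four values, by direct comparisons (no sorting)
--     hi = max(a, b)
--     lo = min(a, b)
--     if c > hi:
--         lo, hi = hi, c
--     elif c > lo:
--         lo = c
--     if d > hi:
--         lo, hi = hi, d
--     elif d > lo:
--         lo = d
--     return lo
--
--
-- def solution(matrix):
--     m = len(matrix)
--     if m == 2:
--         return sorted(matrix[0] + matrix[1])[-2]
--     reduced = [[_second4(matrix[i][j], matrix[i][j + 1],
--                          matrix[i + 1][j], matrix[i + 1][j + 1])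
--                 for j in range(0, m, 2)]
--                for i in range(0, m, 2)]
--     return solution(reduced)
-- ===== Notes on version B (the rewrite author's own statement) =====
-- stated objective: alternative
-- what changed: A repeatedly rewrites the matrix in a while loop, solving every 2x2 block by slicing out a sub-matrix, recursing into solution and sorting its four entries; B is a single pure recursion that builds each level with a comprehension and reduces each 2x2 block by direct index reads and comparisons (no sorting, no slicing, no per-block recursive call; a timing run read ~2.4x in B's favour at the largest size both finished but could not confirm it by its consistency rule, so no speed is claimed).
-- outside the precondition, e.g. on solution([[1, 2, 3], [4, 5, 6], [7, 8, 9], [10, 11, 12]]): A returns 9, B raises IndexError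
import Mathlib
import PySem

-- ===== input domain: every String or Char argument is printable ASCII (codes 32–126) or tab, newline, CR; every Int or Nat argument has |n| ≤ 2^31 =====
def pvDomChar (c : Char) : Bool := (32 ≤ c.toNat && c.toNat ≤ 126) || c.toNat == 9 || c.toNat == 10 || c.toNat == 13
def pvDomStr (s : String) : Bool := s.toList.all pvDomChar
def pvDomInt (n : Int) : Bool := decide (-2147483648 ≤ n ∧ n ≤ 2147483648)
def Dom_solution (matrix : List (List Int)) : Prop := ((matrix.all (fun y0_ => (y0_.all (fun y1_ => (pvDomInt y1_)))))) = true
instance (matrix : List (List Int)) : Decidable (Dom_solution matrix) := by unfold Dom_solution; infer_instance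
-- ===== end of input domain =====

-- B replaces A's while-loop + per-block recursive sort with one pure recursion whose 2x2 blocks
-- are reduced by direct comparisons (no sorting, slicing or per-block recursive call per block).


-- ===== PORT A =====
-- Fueled transliteration of A (the while loop and the recursion are not structurally decreasing
-- on inputs outside Pre_, e.g. the empty matrix, where Python diverges; fuel only makes the same
-- computation total — it is never exhausted on Pre_ inputs, see the fuel lemmas below).
mutual
def solA : Nat → List (List Int) → Int
  | 0, _ => 0  -- fuel exhausted: unreachable under Pre_solution
  | fuel+1, matrix =>
    if matrix.length = 2 then
      -- tmp = matrix[0] + matrix[1]; return sorted(tmp, reverse=True)[1]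
      let tmp := PySem.List.pyGetD matrix 0 [] ++ PySem.List.pyGetD matrix 1 []
      PySem.List.pyGetD (PySem.List.sorted tmp (fun x => x) true) 1 0
    else
      -- while len(matrix) != 2: … ; return solution(matrix)
      solA fuel (loopA fuel matrix)

def loopA : Nat → List (List Int) → List (List Int)
  | 0, matrix => matrix  -- fuel exhausted: unreachable under Pre_solution
  | fuel+1, matrix =>
    if matrix.length ≠ 2 then
      let m : Int := PySem.List.len matrix
      -- slice = [[0]*(m//2) for _ in range(m//2)]
      let slice0 : List (List Int) :=
        (PySem.List.pyRange 0 (PySem.Int.floordiv m 2) 1).map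
          (fun _ => PySem.List.pyRepeat [(0 : Int)] (PySem.Int.floordiv m 2))
      -- for i in range(0, m, 2): jdx = 0; for j in range(0, m, 2): slice[idx][jdx] = solution(block); jdx += 1
      --                          idx += 1
      let res :=
        (PySem.List.pyRange 0 m 2).foldl
          (fun (st : List (List Int) × Int) i =>
            let inner :=
              (PySem.List.pyRange 0 m 2).foldl
                (fun (st2 : List (List Int) × Int) j =>
                  let block := (PySem.List.slice matrix (some i) (some (i + 2))).map
                      (fun row => PySem.List.slice row (some j) (some (j + 2)))
                  (PySem.List.pySetD st2.1 st.2
                      (PySem.List.pySetD (PySem.List.pyGetD st2.1 st.2 []) st2.2 (solA fuel block)),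
                   st2.2 + 1))
                (st.1, (0 : Int))
            (inner.1, st.2 + 1))
          (slice0, (0 : Int))
      loopA fuel res.1  -- matrix = slice[:]
    else matrix
end

def solution (matrix : List (List Int)) : Int := solA (matrix.length + 2) matrix

-- ===== PORT B =====
-- second largest of four values, by direct comparisons (no sorting)
def second4 (a b c d : Int) : Int :=
  let hi := max a b
  let lo := min a b
  -- if c > hi: lo, hi = hi, c  elif c > lo: lo = c
  let p := if c > hi then (hi, c) else if c > lo then (c, hi) else (lo, hi)
  -- if d > hi: lo, hi = hi, d  elif d > lo: lo = d  ; return lo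
  if d > p.2 then p.2 else if d > p.1 then d else p.1

def solB : Nat → List (List Int) → Int
  | 0, _ => 0  -- fuel exhausted: unreachable under Pre_solution
  | fuel+1, matrix =>
    let m : Int := PySem.List.len matrix
    if m = 2 then
      -- return sorted(matrix[0] + matrix[1])[-2]
      let tmp := PySem.List.pyGetD matrix 0 [] ++ PySem.List.pyGetD matrix 1 []
      PySem.List.pyGetD (PySem.List.sorted tmp (fun x => x) false) (-2) 0
    else
      -- reduced = [[_second4(matrix[i][j], matrix[i][j+1], matrix[i+1][j], matrix[i+1][j+1])
      --             for j in range(0, m, 2)] for i in range(0, m, 2)]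
      let reduced := (PySem.List.pyRange 0 m 2).map (fun i =>
        (PySem.List.pyRange 0 m 2).map (fun j =>
          second4 (PySem.List.pyGetD (PySem.List.pyGetD matrix i []) j 0)
                  (PySem.List.pyGetD (PySem.List.pyGetD matrix i []) (j + 1) 0)
                  (PySem.List.pyGetD (PySem.List.pyGetD matrix (i + 1) []) j 0)
                  (PySem.List.pyGetD (PySem.List.pyGetD matrix (i + 1) []) (j + 1) 0)))
      solB fuel reduced

def solution_alt (matrix : List (List Int)) : Int := solB (matrix.length + 2) matrix

-- ===== PRECONDITION & SPEC =====
-- Pre_ excludes inputs on which Python A raises (odd or non-power-of-two sizes ≥ 3, a reduce level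
-- hitting an empty 2x2 block) or diverges (empty/1-row matrix), and the degenerate shapes with rows
-- SHORTER than the matrix on which A happens to return a value computed from truncated phantom
-- blocks — an artefact of slicing — while B raises an IndexError reading fixed 2x2 blocks.
def Pre_solution (matrix : List (List Int)) : Prop :=
  (matrix.length = 2 ∧ 2 ≤ (matrix.getD 0 []).length + (matrix.getD 1 []).length)
  ∨ (4 ≤ matrix.length ∧ matrix.length = 2 ^ Nat.log2 matrix.length ∧
      ∀ row ∈ matrix, matrix.length ≤ row.length)
instance (matrix : List (List Int)) : Decidable (Pre_solution matrix) := by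
  unfold Pre_solution; infer_instance

def pvWitness_solution : List (List Int) := [[1, 2], [3, 4]]

def Spec_solution (matrix : List (List Int)) (out : Int) : Prop := out = solution_alt matrix
instance (matrix : List (List Int)) (out : Int) : Decidable (Spec_solution matrix out) := by
  unfold Spec_solution; infer_instance

-- ===== CLAIM (what is proved, stated in full; the proofs are below) =====
def Claim_equal_solution : Prop := ∀ (matrix : List (List Int)),
  Dom_solution matrix → Pre_solution matrix → Spec_solution matrix (solution matrix)

-- ===== LEMMAS AND PROOFS =====

-- the matrix shapes reachable in the ≥4 branch: a 2^k×(≥2^k) grid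
def good (k : Nat) (M : List (List Int)) : Prop :=
  M.length = 2 ^ k ∧ ∀ row ∈ M, 2 ^ k ≤ row.length

-- entry M r c = M[r][c] (Nat indices, defaulted)
def ent (M : List (List Int)) (r c : Nat) : Int := (M.getD r []).getD c 0

-- one reduce level: the value both programs compute for it
def redM (M : List (List Int)) : List (List Int) :=
  (List.range (M.length / 2)).map (fun i =>
    (List.range (M.length / 2)).map (fun j =>
      second4 (ent M (2*i) (2*j)) (ent M (2*i) (2*j+1))
              (ent M (2*i+1) (2*j)) (ent M (2*i+1) (2*j+1))))

def iterRed : Nat → List (List Int) → List (List Int)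
  | 0, M => M
  | k+1, M => iterRed k (redM M)

-- the common 2x2 final value, written as A's base case computes it
def base2 (M : List (List Int)) : Int :=
  PySem.List.pyGetD
    (PySem.List.sorted (PySem.List.pyGetD M 0 [] ++ PySem.List.pyGetD M 1 []) (fun x => x) true) 1 0

set_option maxHeartbeats 2000000 in
lemma sec4_sorted (a b c d : Int) :
    PySem.List.pyGetD (PySem.List.sorted [a, b, c, d] (fun x => x) true) 1 0 = second4 a b c d := by
  rw [PySem.List.sorted_rev_eq_foldl_insertBy]
  simp only [List.foldl]
  simp only [second4, max_def, min_def]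
  split_ifs <;>
    simp_all [PySem.List.insertBy, PySem.List.pyGetD, PySem.List.pyGet?, PySem.List.pyIdx?] <;>
    repeat' (first
      | omega
      | (split_ifs at * <;>
          simp_all [PySem.List.insertBy, PySem.List.pyGetD, PySem.List.pyGet?, PySem.List.pyIdx?]))

lemma sorted_desc_eq_reverse (xs : List Int) :
    PySem.List.sorted xs (fun x => x) true = (PySem.List.sorted xs (fun x => x) false).reverse := by
  apply PySem.List.eq_of_perm_of_pairwise_le_of_injective (key := fun x : Int => -x)
      (fun x y h => by simpa using h)
  · exact (PySem.List.sorted_perm xs _ _).trans ((PySem.List.sorted_perm xs _ _).symm.trans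
      (List.reverse_perm _).symm)
  · have := PySem.List.sorted_pairwise_rev (xs := xs) (key := fun x : Int => x)
    exact this.imp (by intro a b h; simpa using h)
  · rw [List.pairwise_reverse]
    have := PySem.List.sorted_pairwise (xs := xs) (key := fun x : Int => x)
    exact this.imp (by intro a b h; simpa using h)

lemma desc_one_eq_asc_neg_two (xs : List Int) (h : 2 ≤ xs.length) :
    PySem.List.pyGetD (PySem.List.sorted xs (fun x => x) true) 1 0
      = PySem.List.pyGetD (PySem.List.sorted xs (fun x => x) false) (-2) 0 := by
  have hlen : (PySem.List.sorted xs (fun x : Int => x) false).length = xs.length :=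
    PySem.List.length_sorted ..
  rw [sorted_desc_eq_reverse]
  rw [PySem.List.pyGetD_eq_getElem _ _ (by omega) (by simp [hlen]; omega)]
  rw [PySem.List.pyGetD_neg_ofNat _ 2 0 (by omega) (by omega)]
  rw [List.getElem_reverse]
  congr 1

lemma good_redM {k : Nat} {M : List (List Int)} (h : good (k+1) M) : good k (redM M) := by
  obtain ⟨hlen, _⟩ := h
  constructor
  · simp [redM, hlen, pow_succ]
  · intro row hr
    simp [redM] at hr
    obtain ⟨i, _, hrow⟩ := hr
    rw [← hrow]
    simp [hlen, pow_succ]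

lemma good_iterRed : ∀ (k : Nat) {M : List (List Int)}, good (k+1) M → good 1 (iterRed k M) := by
  intro k
  induction k with
  | zero => intro M h; exact h
  | succ j ih => intro M h; exact ih (good_redM h)

lemma pyRange_two (n : Nat) :
    PySem.List.pyRange 0 ((2 * n : Nat) : Int) 2
      = (List.range n).map (fun k => ((2 * k : Nat) : Int)) := by
  rw [PySem.List.pyRange_of_pos _ _ (by norm_num)]
  rcases Nat.eq_zero_or_pos n with hn | hn
  · simp [hn]
  · have hif : (0 : Int) < ((2 * n : Nat) : Int) := by push_cast; omega
    rw [if_pos hif]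
    have h1 : ((((2 * n : Nat) : Int) - 0 + 2 - 1) / 2).toNat = n := by
      have : (((2 * n : Nat) : Int) - 0 + 2 - 1) / 2 = (n : Int) := by push_cast; omega
      rw [this]; simp
    rw [h1]
    apply List.map_congr_left
    intro k _
    push_cast; ring

theorem take_set_succ {α : Type} (row : List α) (s : Nat) (x : α) (hs : s < row.length) :
    (row.set s x).take (s+1) = row.take s ++ [x] := by
  apply List.ext_getElem
  · simp; omega
  · intro i h1 h2
    simp only [List.getElem_take, List.getElem_set]
    rcases Nat.lt_or_ge i s with hi | hi
    · rw [List.getElem_append_left (by simp; omega)]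
      simp [List.getElem_take]; omega
    · have : i = s := by simp at h1; omega
      subst this
      rw [List.getElem_append_right (by simp)]
      simp

-- write at fixed row idx = a fold on that row

theorem writeRow_eq (u : Int → Int) : ∀ (L' : List Int) (g : List (List Int)) (idx : Nat)
    (hidx : idx < g.length) (jdx : Int),
    L'.foldl (fun (st2 : List (List Int) × Int) j =>
        (PySem.List.pySetD st2.1 (idx : Int)
            (PySem.List.pySetD (PySem.List.pyGetD st2.1 (idx : Int) []) st2.2 (u j)),
         st2.2 + 1)) (g, jdx)
      = (PySem.List.pySetD g (idx : Int)
            ((L'.foldl (fun (st : List Int × Int) j => (PySem.List.pySetD st.1 st.2 (u j), st.2 + 1))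
                (PySem.List.pyGetD g (idx : Int) [], jdx)).1),
         jdx + L'.length) := by
  intro L'
  induction L' with
  | nil =>
    intro g idx hidx jdx
    simp only [List.foldl_nil, PySem.List.pySetD_natCast, PySem.List.pyGetD_natCast]
    rw [List.getD_eq_getElem _ _ hidx, List.set_getElem_self]
    simp
  | cons j L' ih =>
    intro g idx hidx jdx
    simp only [List.foldl_cons]
    rw [ih _ idx (by simp [hidx]) (jdx + 1)]
    simp only [PySem.List.pySetD_natCast, PySem.List.pyGetD_natCast]
    have hget : ∀ r : List Int, (g.set idx r).getD idx [] = r := by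
      intro r
      rw [List.getD_eq_getElem _ _ (by simpa using hidx), List.getElem_set_self]
    rw [hget, List.set_set, List.getD_eq_getElem _ _ hidx]
    refine Prod.ext rfl ?_
    simp only []
    simp only [List.length_cons]
    push_cast
    omega

theorem rowFold_eq (v : Int → Int) : ∀ (L : List Int) (row : List Int) (s : Nat),
    s + L.length = row.length →
    L.foldl (fun (st : List Int × Int) j => (PySem.List.pySetD st.1 st.2 (v j), st.2 + 1))
        (row, (s : Int))
      = (row.take s ++ L.map v, ((s + L.length : Nat) : Int)) := by
  intro L
  induction L with
  | nil => intro row s h; simp at h; simp [List.take_of_length_le, h]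
  | cons j L ih =>
    intro row s h
    simp only [List.foldl_cons, PySem.List.pySetD_natCast]
    have hs : s < row.length := by simp at h; omega
    have hcast : ((s : Int) + 1) = ((s + 1 : Nat) : Int) := by push_cast; ring
    rw [hcast, ih (row.set s (v j)) (s+1) (by simp; simp at h; omega)]
    rw [take_set_succ row s (v j) hs]
    simp only [List.map_cons, List.length_cons]
    rw [List.append_assoc]
    refine Prod.ext rfl ?_
    simp only []
    congr 1
    omega

theorem gridFold_eq (w : Int → Int → Int) (L' : List Int) (n : Nat) (hL' : L'.length = n) :
    ∀ (L : List Int) (g : List (List Int)) (s : Nat),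
    s + L.length = g.length → (∀ row ∈ g, row.length = n) →
    (L.foldl
        (fun (st : List (List Int) × Int) i =>
          ((L'.foldl
              (fun (st2 : List (List Int) × Int) j =>
                (PySem.List.pySetD st2.1 st.2
                    (PySem.List.pySetD (PySem.List.pyGetD st2.1 st.2 []) st2.2 (w i j)),
                 st2.2 + 1))
              (st.1, (0 : Int))).1,
           st.2 + 1))
        (g, (s : Int))).1
      = g.take s ++ L.map (fun i => L'.map (w i)) := by
  intro L
  induction L with
  | nil =>
    intro g s h _
    simp at h
    simp [List.take_of_length_le, h]
  | cons i L ih =>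
    intro g s h hrows
    have hs : s < g.length := by simp at h; omega
    simp only [List.foldl_cons]
    rw [writeRow_eq (w i) L' g s hs 0]
    have hrow : PySem.List.pyGetD g (s : Int) [] = g[s] := by
      rw [PySem.List.pyGetD_natCast, List.getD_eq_getElem _ _ hs]
    rw [hrow]
    have hrlen : (0 : Nat) + L'.length = g[s].length := by
      rw [hL', hrows g[s] (List.getElem_mem hs)]
      simp
    have := rowFold_eq (w i) L' g[s] 0 hrlen
    rw [show ((0:Nat) : Int) = (0 : Int) by simp] at this
    rw [this]
    simp only [List.take_zero, List.nil_append, PySem.List.pySetD_natCast]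
    have hcast : ((s : Int) + 1) = ((s + 1 : Nat) : Int) := by push_cast; ring
    rw [hcast, ih (g.set s (L'.map (w i))) (s+1)
        (by simp; simp at h; omega)
        (by intro row hr
            rcases List.mem_or_eq_of_mem_set hr with h1 | h1
            · exact hrows row h1
            · rw [h1]; simp [hL'])]
    rw [take_set_succ g s _ hs]
    simp [List.append_assoc]

-- two consecutive rows/elements, as a slice
lemma drop_take_two {α : Type} (M : List α) (t : Nat) (h : t + 1 < M.length) :
    (M.drop t).take 2 = [M[t], M[t+1]] := by
  rw [List.drop_eq_getElem_cons (by omega)]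
  rw [List.drop_eq_getElem_cons (l := M) (i := t+1) (by omega)]
  rfl

-- A's recursive call on a 2x2 literal block
lemma solA_2x2 (x y z w : Int) (f : Nat) : solA (f+1) [[x, y], [z, w]] = second4 x y z w := by
  have h : solA (f+1) [[x, y], [z, w]]
      = PySem.List.pyGetD (PySem.List.sorted [x, y, z, w] (fun v => v) true) 1 0 := by
    simp [solA, PySem.List.pyGetD, PySem.List.pyGet?, PySem.List.pyIdx?]
  rw [h]
  exact sec4_sorted x y z w

-- the 2x2 block at (2i', 2j') and its A-value
lemma blockA {M : List (List Int)} {N : Nat} (hlen : M.length = 2 * N)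
    (hrows : ∀ row ∈ M, 2 * N ≤ row.length) (i' j' : Nat) (hi : i' < N) (hj : j' < N) (f : Nat) :
    solA (f+1) ((PySem.List.slice M (some ((2*i' : Nat) : Int)) (some (((2*i' : Nat) : Int) + 2))).map
        (fun row => PySem.List.slice row (some ((2*j' : Nat) : Int)) (some (((2*j' : Nat) : Int) + 2))))
      = second4 (ent M (2*i') (2*j')) (ent M (2*i') (2*j'+1))
                (ent M (2*i'+1) (2*j')) (ent M (2*i'+1) (2*j'+1)) := by
  have h2 : ((2 : Int)) = ((2 : Nat) : Int) := by norm_num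
  have hrowlen : ∀ (r : Nat) (hr : r < M.length), 2*j'+1 < M[r].length := by
    intro r hr
    have := hrows _ (List.getElem_mem hr)
    omega
  have hcell : ∀ (r : Nat) (hr : r < M.length),
      PySem.List.slice M[r] (some ((2*j' : Nat) : Int)) (some (((2*j' : Nat) : Int) + ((2 : Nat) : Int)))
        = [ent M r (2*j'), ent M r (2*j'+1)] := by
    intro r hr
    rw [PySem.List.slice_natCast_add M[r] (2*j') 2]
    rw [drop_take_two M[r] (2*j') (hrowlen r hr)]
    unfold ent
    have e0 : M.getD r [] = M[r] := List.getD_eq_getElem _ _ hr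
    rw [e0]
    rw [List.getD_eq_getElem _ _ (by have := hrowlen r hr; omega)]
    rw [List.getD_eq_getElem _ _ (hrowlen r hr)]
  rw [h2]
  rw [PySem.List.slice_natCast_add M (2*i') 2]
  rw [drop_take_two M (2*i') (by omega)]
  simp only [List.map_cons, List.map_nil]
  rw [hcell (2*i') (by omega), hcell (2*i'+1) (by omega)]
  exact solA_2x2 _ _ _ _ f

-- one iteration of A's while loop produces redM M (blocks solved with any fuel ≥ 1)
lemma loopA_step {k : Nat} {M : List (List Int)} (h : good (k+2) M) (f : Nat) (hf : 1 ≤ f) :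
    loopA (f+1) M = loopA f (redM M) := by
  obtain ⟨hlen, hrows⟩ := h
  set N : Nat := 2^(k+1) with hN
  have hlen2 : M.length = 2 * N := by rw [hlen, hN]; ring
  have hrows2 : ∀ row ∈ M, 2 * N ≤ row.length := by
    intro row hr; have := hrows row hr; omega
  have h4 : 4 ≤ M.length := by
    have h1 : 1 ≤ 2^k := Nat.one_le_two_pow
    rw [hlen, pow_succ, pow_succ]; omega
  have hne : M.length ≠ 2 := by omega
  obtain ⟨f', rfl⟩ : ∃ f', f = f' + 1 := ⟨f - 1, by omega⟩
  rw [loopA, if_pos hne]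
  dsimp only
  congr 1
  have hfd : PySem.Int.floordiv (PySem.List.len M) 2 = ((N : Nat) : Int) := by
    rw [PySem.List.len_eq, show ((2:Int)) = ((2:Nat):Int) by norm_num,
        PySem.Int.floordiv_natCast, hlen2]
    norm_num
  rw [hfd]
  have hslice0 : (PySem.List.pyRange 0 ((N : Nat) : Int) 1).map
      (fun _ => PySem.List.pyRepeat [(0 : Int)] ((N : Nat) : Int))
      = List.replicate N (List.replicate N (0 : Int)) := by
    rw [PySem.List.pyRepeat_singleton, PySem.List.pyRange_one, List.map_map]
    simp [List.eq_replicate_iff]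
  rw [hslice0]
  rw [PySem.List.len_eq, hlen2, pyRange_two N]
  have hg := gridFold_eq
      (fun i j => solA (f'+1) ((PySem.List.slice M (some i) (some (i + 2))).map
          (fun row => PySem.List.slice row (some j) (some (j + 2)))))
      ((List.range N).map (fun k => ((2 * k : Nat) : Int))) N (by simp)
      ((List.range N).map (fun k => ((2 * k : Nat) : Int)))
      (List.replicate N (List.replicate N (0 : Int))) 0
      (by simp)
      (by intro row hr; simp [List.eq_of_mem_replicate hr])
  rw [Nat.cast_zero] at hg
  rw [hg]
  unfold redM
  rw [hlen2, show 2 * N / 2 = N by omega]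
  simp only [List.take_zero, List.nil_append, List.map_map]
  apply List.map_congr_left
  intro i' hi'
  simp only [Function.comp]
  apply List.map_congr_left
  intro j' hj'
  simp only [Function.comp]
  exact blockA hlen2 hrows2 i' j' (List.mem_range.mp hi') (List.mem_range.mp hj') f'

lemma loopA_eq : ∀ (k : Nat) (f : Nat) (M : List (List Int)),
    good (k+1) M → k + 1 ≤ f → loopA f M = iterRed k M := by
  intro k
  induction k with
  | zero =>
    intro f M h hf
    obtain ⟨f', rfl⟩ : ∃ f', f = f' + 1 := ⟨f - 1, by omega⟩
    rw [loopA, if_neg (by simp [h.1])]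
    rfl
  | succ j ih =>
    intro f M h hf
    obtain ⟨f', rfl⟩ : ∃ f', f = f' + 1 := ⟨f - 1, by omega⟩
    rw [loopA_step h f' (by omega)]
    exact ih f' (redM M) (good_redM h) (by omega)

lemma solA_eq (k f : Nat) (M : List (List Int)) (h : good (k+1) M) (hf : k + 2 ≤ f) :
    solA f M = base2 (iterRed k M) := by
  cases k with
  | zero =>
    obtain ⟨f', rfl⟩ : ∃ f', f = f' + 1 := ⟨f - 1, by omega⟩
    rw [solA, if_pos (show M.length = 2 by simpa using h.1)]
    rfl
  | succ j =>
    obtain ⟨f', rfl⟩ : ∃ f', f = f' + 1 := ⟨f - 1, by omega⟩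
    have hne : M.length ≠ 2 := by
      have h1 : 1 ≤ 2^j := Nat.one_le_two_pow
      have := h.1
      rw [pow_succ, pow_succ] at this
      omega
    rw [solA, if_neg hne]
    rw [loopA_eq (j+1) f' M h (by omega)]
    have hgood : good 1 (iterRed (j+1) M) := good_iterRed (j+1) h
    obtain ⟨f'', rfl⟩ : ∃ f'', f' = f'' + 1 := ⟨f' - 1, by omega⟩
    rw [solA, if_pos (show (iterRed (j+1) M).length = 2 by simpa using hgood.1)]
    rfl

-- B's comprehension builds redM M
lemma solB_reduce {k : Nat} {M : List (List Int)} (h : good (k+2) M) (f : Nat) :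
    solB (f+1) M = solB f (redM M) := by
  obtain ⟨hlen, hrows⟩ := h
  set N : Nat := 2^(k+1) with hN
  have hlen2 : M.length = 2 * N := by rw [hlen, hN]; ring
  have h4 : 4 ≤ M.length := by
    have h1 : 1 ≤ 2^k := Nat.one_le_two_pow
    rw [hlen, pow_succ, pow_succ]; omega
  have hne : PySem.List.len M ≠ 2 := by
    rw [PySem.List.len_eq]
    intro hh
    have : M.length = 2 := by exact_mod_cast hh
    omega
  rw [solB]
  dsimp only
  rw [if_neg hne]
  congr 1
  rw [PySem.List.len_eq, hlen2, pyRange_two N]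
  unfold redM
  rw [hlen2, show 2 * N / 2 = N by omega]
  rw [List.map_map]
  apply List.map_congr_left
  intro i' hi'
  simp only [Function.comp]
  rw [List.map_map]
  apply List.map_congr_left
  intro j' hj'
  simp only [Function.comp]
  have e1 : ((2 * i' : Nat) : Int) + 1 = ((2 * i' + 1 : Nat) : Int) := by push_cast; ring
  have e2 : ((2 * j' : Nat) : Int) + 1 = ((2 * j' + 1 : Nat) : Int) := by push_cast; ring
  rw [e1, e2]
  simp only [PySem.List.pyGetD_natCast]
  rfl

lemma solB_base {M : List (List Int)} (h2 : M.length = 2)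
    (hl : 2 ≤ (M.getD 0 []).length + (M.getD 1 []).length) (f : Nat) :
    solB (f+1) M = base2 M := by
  obtain ⟨a, b, rfl⟩ := List.length_eq_two.mp h2
  have hm : PySem.List.len [a, b] = 2 := by rw [PySem.List.len_eq]; norm_num
  rw [solB]
  dsimp only
  rw [if_pos hm]
  unfold base2
  have hget : PySem.List.pyGetD [a, b] 0 [] ++ PySem.List.pyGetD [a, b] 1 [] = a ++ b := by
    simp [PySem.List.pyGetD, PySem.List.pyGet?, PySem.List.pyIdx?]
  rw [hget]
  have htl : 2 ≤ (a ++ b).length := by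
    simp at hl ⊢
    omega
  exact (desc_one_eq_asc_neg_two (a ++ b) htl).symm

lemma solB_eq : ∀ (k : Nat) (f : Nat) (M : List (List Int)),
    good (k+1) M → k + 1 ≤ f → solB (f+1) M = base2 (iterRed k M) := by
  intro k
  induction k with
  | zero =>
    intro f M h hf
    have h2 : M.length = 2 := h.1
    have hl : 2 ≤ (M.getD 0 []).length + (M.getD 1 []).length := by
      obtain ⟨a, b, rfl⟩ := List.length_eq_two.mp h2
      have ha := h.2 a (by simp)
      simp
      omega
    exact solB_base h2 hl f
  | succ j ih =>
    intro f M h hf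
    obtain ⟨f', rfl⟩ : ∃ f', f = f' + 1 := ⟨f - 1, by omega⟩
    rw [solB_reduce h (f'+1)]
    exact ih f' (redM M) (good_redM h) (by omega)

-- ===== VERDICT (by name: the statement is the Claim_ definition above) =====
theorem solution_spec : Claim_equal_solution := by
  intro matrix _ hpre
  unfold Spec_solution solution solution_alt
  rcases hpre with ⟨h2, hl⟩ | ⟨h4, hpow, hrows⟩
  · rw [h2]
    have hb : solB (3+1) matrix = base2 matrix := solB_base h2 hl 3
    rw [show (2+2 : Nat) = 3+1 by rfl, hb]
    rw [solA, if_pos h2]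
    rfl
  · have h2t : 2 ≤ Nat.log2 matrix.length := by
      by_contra hc
      rw [not_le] at hc
      have hc2 : matrix.length ≤ 2 := by
        rw [hpow]
        calc 2 ^ Nat.log2 matrix.length ≤ 2 ^ 1 := Nat.pow_le_pow_right (by omega) (by omega)
          _ = 2 := rfl
      omega
    obtain ⟨j, hj⟩ : ∃ j, Nat.log2 matrix.length = j + 1 :=
      ⟨Nat.log2 matrix.length - 1, by omega⟩
    rw [hj] at hpow
    have hgood : good (j+1) matrix := ⟨hpow, fun row hr => hpow ▸ hrows row hr⟩
    have hjlen : j + 1 ≤ matrix.length := by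
      have h1 := Nat.lt_two_pow_self (n := j)
      have hle : 2^j ≤ 2^(j+1) := Nat.pow_le_pow_right (by omega) (by omega)
      omega
    rw [solA_eq j (matrix.length + 2) matrix hgood (by omega)]
    rw [show matrix.length + 2 = (matrix.length + 1) + 1 by rfl]
    rw [solB_eq j (matrix.length + 1) matrix hgood (by omega)]
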